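-- pv_equiv track=rewrite | github.com/jav-ram/AI-SearchGraph | graphsearch/list_to_table.py | get_table_sudoku
-- ===== SOURCE A (Python) =====
-- def get_table_sudoku(data, row_length):
--     table = '<table>'
--     counter = 0
--     for element in data:
--         if counter % row_length == 0:
--             table += '<tr>'
--         if element == 0 or element == '0':
--             table += '<td class="empty">%s</td>' % element
--         else:
--             table += '<td>%s</td>' % element
--         counter += 1
--         if counter % row_length == 0:
--             table += '</tr>'
--     if counter % row_length != 0:
--         for i in range(0, row_length - counter % row_length):
--             table += '<td>&nbsp;</td>'
--         table += '</tr>'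
--     table += '</table>'
--     return table
-- ===== SOURCE B (Python) =====
-- def get_table_sudoku(data, row_length):
--     rows = [data[i:i + row_length] for i in range(0, len(data), row_length)]
--     parts = ['<table>']
--     for row in rows:
--         parts.append('<tr>')
--         for element in row:
--             if element == 0 or element == '0':
--                 parts.append('<td class="empty">%s</td>' % element)
--             else:
--                 parts.append('<td>%s</td>' % element)
--         parts.extend(['<td>&nbsp;</td>'] * (row_length - len(row)))
--         parts.append('</tr>')
--     parts.append('</table>')
--     return ''.join(parts)
-- ===== Notes on version B (the rewrite author's own statement) =====
-- stated objective: alternative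
-- what changed: A threads one growing string through a counter-modulo state machine that decides per element whether a row starts or ends; B first partitions the data into row chunks with a range-step slicer, then renders each chunk independently (cells plus tail padding) and joins the pieces.
-- outside the precondition, e.g. on get_table_sudoku([1], -1): A returns '<table><tr><td>1</td></tr></table>', B returns '<table></table>'
import Mathlib
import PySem

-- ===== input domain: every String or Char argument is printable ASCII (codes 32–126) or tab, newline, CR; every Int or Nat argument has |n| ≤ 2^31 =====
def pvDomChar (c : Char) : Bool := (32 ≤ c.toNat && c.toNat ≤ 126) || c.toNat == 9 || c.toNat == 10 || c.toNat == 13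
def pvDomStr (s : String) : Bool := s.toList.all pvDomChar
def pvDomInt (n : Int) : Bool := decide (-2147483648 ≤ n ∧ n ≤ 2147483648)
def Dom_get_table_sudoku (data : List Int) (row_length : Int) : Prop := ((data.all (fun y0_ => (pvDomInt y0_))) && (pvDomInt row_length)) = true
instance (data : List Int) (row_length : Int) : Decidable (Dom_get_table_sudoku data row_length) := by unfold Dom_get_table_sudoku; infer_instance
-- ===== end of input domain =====

-- B renders the table by first chunking the data into rows (range-step slicing) and joining
-- per-row HTML, instead of A's single pass driven by a counter-modulo state machine; equal output on Pre_.


-- ===== PORT A =====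
-- loop body of A's for-loop, as a named step function over the state (table, counter);
-- strings are built as List Char (PySem convention), wrapped by String.ofList at the end.
-- Python's `element == 0 or element == '0'`: the second disjunct can never hold for int data,
-- so the test is ported as `element = 0`.
def pvStepA (row_length : Int) (st : List Char × Int) (element : Int) : List Char × Int :=
  let table := st.1
  let counter := st.2
  let table := if PySem.Int.mod counter row_length = 0 then table ++ "<tr>".toList else table
  let table := if element = 0
    then table ++ "<td class=\"empty\">".toList ++ PySem.Int.toChars element ++ "</td>".toList
    else table ++ "<td>".toList ++ PySem.Int.toChars element ++ "</td>".toList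
  let counter := counter + 1
  let table := if PySem.Int.mod counter row_length = 0 then table ++ "</tr>".toList else table
  (table, counter)

def get_table_sudoku (data : List Int) (row_length : Int) : String :=
  let res := data.foldl (pvStepA row_length) ("<table>".toList, 0)
  let table := res.1
  let counter := res.2
  let table :=
    if PySem.Int.mod counter row_length ≠ 0 then
      ((PySem.List.pyRange 0 (row_length - PySem.Int.mod counter row_length) 1).foldl
        (fun t _ => t ++ "<td>&nbsp;</td>".toList) table) ++ "</tr>".toList
    else table
  String.ofList (table ++ "</table>".toList)

-- ===== PORT B =====
-- one data cell, exactly B's if/else (again `element == '0'` is unreachable for int data)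
def pvTd (element : Int) : List Char :=
  if element = 0
  then "<td class=\"empty\">".toList ++ PySem.Int.toChars element ++ "</td>".toList
  else "<td>".toList ++ PySem.Int.toChars element ++ "</td>".toList

-- the parts appended for one row chunk: '<tr>', its cells, the padding cells, '</tr>'
def pvRowHtml (row_length : Int) (row : List Int) : List Char :=
  "<tr>".toList ++ (row.map pvTd).flatten
    ++ (List.replicate (row_length - (row.length : Int)).toNat "<td>&nbsp;</td>".toList).flatten
    ++ "</tr>".toList

-- rows = [data[i:i+row_length] for i in range(0, len(data), row_length)]
def pvRowsB (data : List Int) (row_length : Int) : List (List Int) :=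
  (PySem.List.pyRange 0 (data.length : Int) row_length).map
    (fun i => PySem.List.slice data (some i) (some (i + row_length)))

def get_table_sudoku_alt (data : List Int) (row_length : Int) : String :=
  let rows := pvRowsB data row_length
  String.ofList ("<table>".toList ++ (rows.map (pvRowHtml row_length)).flatten ++ "</table>".toList)

-- ===== PRECONDITION & SPEC =====
-- Pre_ excludes row_length = 0, where A raises ZeroDivisionError (B raises ValueError), and
-- row_length < 0, a degenerate corner where A's unpadded grouping by |row_length| and B's empty
-- table are equally accidental readings of a nonsensical row length.
def Pre_get_table_sudoku (data : List Int) (row_length : Int) : Prop := 1 ≤ row_length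
instance (data : List Int) (row_length : Int) : Decidable (Pre_get_table_sudoku data row_length) := by
  unfold Pre_get_table_sudoku; infer_instance

def pvWitness_get_table_sudoku : List Int × Int := ([5, 0, 3, 1], 3)

def Spec_get_table_sudoku (data : List Int) (row_length : Int) (out : String) : Prop :=
  out = get_table_sudoku_alt data row_length
instance (data : List Int) (row_length : Int) (out : String) : Decidable (Spec_get_table_sudoku data row_length out) := by
  unfold Spec_get_table_sudoku; infer_instance

-- ===== CLAIM (what is proved, stated in full; the proofs are below) =====
def Claim_equal_get_table_sudoku : Prop := ∀ (data : List Int) (row_length : Int),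
  Dom_get_table_sudoku data row_length → Pre_get_table_sudoku data row_length →
  Spec_get_table_sudoku data row_length (get_table_sudoku data row_length)

-- ===== LEMMAS AND PROOFS =====

-- the string A's loop has appended after processing `data` starting from counter 0
def pvBody (rl : Int) (data : List Int) : List Char := (data.foldl (pvStepA rl) ([], 0)).1

-- the string A appends after the loop, as a function of the final counter value n
def pvPad (rl n : Int) : List Char :=
  if PySem.Int.mod n rl ≠ 0 then
    (List.replicate (rl - PySem.Int.mod n rl).toNat "<td>&nbsp;</td>".toList).flatten
      ++ "</tr>".toList
  else []

-- one step appends to the table and increments the counter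
theorem pvStepA_shape (rl : Int) (t : List Char) (c x : Int) :
    pvStepA rl (t, c) x = (t ++ (pvStepA rl ([], c) x).1, c + 1) := by
  simp only [pvStepA]
  split_ifs <;> simp

theorem pvFoldA_factor (rl : Int) :
    ∀ (l : List Int) (t : List Char) (c : Int),
      List.foldl (pvStepA rl) (t, c) l
        = (t ++ (List.foldl (pvStepA rl) (([] : List Char), c) l).1, c + l.length) := by
  intro l
  induction l with
  | nil => intro t c; simp
  | cons x xs ih =>
    intro t c
    rw [List.foldl_cons, List.foldl_cons, pvStepA_shape, pvStepA_shape, List.nil_append,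
      ih (t ++ (pvStepA rl ([], c) x).1) (c + 1), ih (pvStepA rl ([], c) x).1 (c + 1)]
    simp only [Prod.mk.injEq]
    refine ⟨by simp [List.append_assoc], by simp only [List.length_cons]; push_cast; omega⟩

-- the appended string depends on the counter only through counter % rl
theorem pvStepA_fst_congr (rl : Int) (hrl : 0 < rl) (c c' x : Int) (h : c % rl = c' % rl) :
    (pvStepA rl ([], c) x).1 = (pvStepA rl ([], c') x).1 := by
  have h1 : (c + 1) % rl = (c' + 1) % rl := by
    rw [Int.add_emod, h, ← Int.add_emod]
  simp only [pvStepA, PySem.Int.mod_eq_emod_of_pos hrl, h, h1]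

theorem pvFoldA_congr (rl : Int) (hrl : 0 < rl) :
    ∀ (l : List Int) (c c' : Int), c % rl = c' % rl →
      (List.foldl (pvStepA rl) (([] : List Char), c) l).1
        = (List.foldl (pvStepA rl) (([] : List Char), c') l).1 := by
  intro l
  induction l with
  | nil => intro c c' _; rfl
  | cons x xs ih =>
    intro c c' h
    have h1 : (c + 1) % rl = (c' + 1) % rl := by
      rw [Int.add_emod, h, ← Int.add_emod]
    rw [List.foldl_cons, List.foldl_cons]
    have e1 : pvStepA rl (([] : List Char), c) x = ((pvStepA rl ([], c) x).1, c + 1) := by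
      rw [pvStepA_shape, List.nil_append]
    have e2 : pvStepA rl (([] : List Char), c') x = ((pvStepA rl ([], c') x).1, c' + 1) := by
      rw [pvStepA_shape, List.nil_append]
    rw [e1, e2, pvFoldA_factor rl xs (pvStepA rl ([], c) x).1 (c + 1),
      pvFoldA_factor rl xs (pvStepA rl ([], c') x).1 (c' + 1)]
    dsimp only
    rw [pvStepA_fst_congr rl hrl c c' x h, ih _ _ h1]

-- middle of a row: counters c, c+1, …: no '<tr>' is emitted, '</tr>' exactly when the counter reaches rl
theorem pvFoldA_mid (rl : Int) (hrl : 0 < rl) :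
    ∀ (l : List Int) (c : Int), 0 < c → c + (l.length : Int) ≤ rl →
      (List.foldl (pvStepA rl) (([] : List Char), c) l).1
        = (l.map pvTd).flatten
          ++ (if c + (l.length : Int) = rl ∧ l ≠ [] then "</tr>".toList else []) := by
  intro l
  induction l with
  | nil => intro c _ _; simp
  | cons x xs ih =>
    intro c hc hle
    have hlen : (0 : Int) ≤ xs.length := by positivity
    have hle' : c + 1 + (xs.length : Int) ≤ rl := by
      simp only [List.length_cons] at hle; push_cast at hle; omega
    have hclt : c < rl := by omega
    have hmodc : c % rl = c := Int.emod_eq_of_lt (by omega) hclt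
    rw [List.foldl_cons]
    have estep : pvStepA rl (([] : List Char), c) x
        = ((if (c + 1) % rl = 0 then pvTd x ++ "</tr>".toList else pvTd x), c + 1) := by
      simp only [pvStepA, pvTd, PySem.Int.mod_eq_emod_of_pos hrl, hmodc]
      have : ¬ c = 0 := by omega
      split_ifs <;> simp_all
    rw [estep]
    by_cases hc1 : c + 1 = rl
    · have hxs : xs = [] := by
        have hx0 : (xs.length : Int) ≤ 0 := by omega
        have : xs.length = 0 := by omega
        exact List.length_eq_zero_iff.mp this
      subst hxs
      have hm : (c + 1) % rl = 0 := by rw [hc1]; exact Int.emod_self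
      simp [hm, hc1]
    · have hc1lt : c + 1 < rl := by omega
      have hm1 : (c + 1) % rl = c + 1 := Int.emod_eq_of_lt (by omega) hc1lt
      have hne0 : ¬ (c + 1) % rl = 0 := by omega
      rw [if_neg hne0, pvFoldA_factor, ih (c + 1) (by omega) (by omega)]
      dsimp only
      by_cases hxs : xs = []
      · subst hxs
        simp [show ¬ (c + (1 : Int) = rl) from by omega]
      · have hxne : x :: xs ≠ [] := by simp
        by_cases hcnd : c + 1 + (xs.length : Int) = rl
        · rw [if_pos ⟨hcnd, hxs⟩,
            if_pos ⟨by simp only [List.length_cons]; push_cast; omega, hxne⟩]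
          simp [List.append_assoc]
        · rw [if_neg (fun h => hcnd h.1),
            if_neg (by
              rintro ⟨h1, -⟩
              simp only [List.length_cons] at h1; push_cast at h1
              exact hcnd (by omega))]
          simp [List.append_assoc]

-- a whole (possibly short) row starting at counter 0: '<tr>', the cells, '</tr>' iff the row is full
theorem pvFoldA_chunk (rl : Int) (hrl : 0 < rl) (l : List Int) (hne : l ≠ [])
    (hle : (l.length : Int) ≤ rl) :
    (List.foldl (pvStepA rl) (([] : List Char), 0) l).1
      = "<tr>".toList ++ (l.map pvTd).flatten
        ++ (if (l.length : Int) = rl then "</tr>".toList else []) := by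
  cases l with
  | nil => exact absurd rfl hne
  | cons x xs =>
    have hlen : (0 : Int) ≤ xs.length := by positivity
    have hle' : 1 + (xs.length : Int) ≤ rl := by
      simp only [List.length_cons] at hle; push_cast at hle; omega
    rw [List.foldl_cons]
    have hmod0 : (0 : Int) % rl = 0 := Int.zero_emod rl
    have estep : pvStepA rl (([] : List Char), 0) x
        = ((if (1 : Int) % rl = 0 then "<tr>".toList ++ pvTd x ++ "</tr>".toList
            else "<tr>".toList ++ pvTd x), 1) := by
      simp only [pvStepA, pvTd, PySem.Int.mod_eq_emod_of_pos hrl, hmod0]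
      norm_num
      split_ifs <;> simp_all [List.append_assoc]
    rw [estep]
    by_cases hr1 : rl = 1
    · have hxs : xs = [] := by
        have : (xs.length : Int) ≤ 0 := by omega
        exact List.length_eq_zero_iff.mp (by omega)
      subst hxs
      have hm : (1 : Int) % rl = 0 := by rw [hr1]; decide
      simp [hm, hr1]
    · have h1lt : (1 : Int) < rl := by omega
      have h1mod : (1 : Int) % rl = 1 := Int.emod_eq_of_lt (by omega) h1lt
      have hne0 : ¬ (1 : Int) % rl = 0 := by omega
      rw [if_neg hne0, pvFoldA_factor, pvFoldA_mid rl hrl xs 1 (by omega) (by omega)]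
      dsimp only
      by_cases hxs : xs = []
      · subst hxs
        simp [show ¬ ((1 : Int) = rl) from by omega, List.append_assoc]
      · by_cases hcnd : 1 + (xs.length : Int) = rl
        · rw [if_pos ⟨hcnd, hxs⟩,
            if_pos (by simp only [List.length_cons]; push_cast; omega)]
          simp [List.append_assoc]
        · rw [if_neg (fun h => hcnd h.1),
            if_neg (by
              simp only [List.length_cons]; push_cast
              omega)]
          simp [List.append_assoc]

-- the padding loop appends replicated cells
theorem pvPadFold (r : List Int) :
    ∀ (t : List Char),
      r.foldl (fun t _ => t ++ "<td>&nbsp;</td>".toList) t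
        = t ++ (List.replicate r.length "<td>&nbsp;</td>".toList).flatten := by
  induction r with
  | nil => intro t; simp
  | cons x xs ih => intro t; simp [ih, List.replicate_succ, List.append_assoc]

-- peel the first index off range(0, n, rl)
theorem pvRange_peel (rl n : Int) (hrl : 0 < rl) (hn : 0 < n) :
    PySem.List.pyRange 0 n rl
      = 0 :: (PySem.List.pyRange 0 (n - rl) rl).map (· + rl) := by
  rw [PySem.List.pyRange_of_pos _ _ hrl, PySem.List.pyRange_of_pos _ _ hrl]
  have hcnt : (if (0 : Int) < n then ((n - 0 + rl - 1) / rl).toNat else 0)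
      = (if (0 : Int) < n - rl then ((n - rl - 0 + rl - 1) / rl).toNat else 0) + 1 := by
    rw [if_pos hn]
    by_cases h : (0 : Int) < n - rl
    · rw [if_pos h]
      have e : n - 0 + rl - 1 = (n - rl - 0 + rl - 1) + 1 * rl := by ring
      rw [e, Int.add_mul_ediv_right _ _ (by omega : rl ≠ 0)]
      have hq : 0 ≤ (n - rl - 0 + rl - 1) / rl := Int.ediv_nonneg (by omega) (by omega)
      omega
    · rw [if_neg h]
      have hb1 : 1 * rl ≤ n - 0 + rl - 1 := by omega
      have hb2 : n - 0 + rl - 1 < (1 + 1) * rl := by omega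
      have : PySem.Int.floordiv (n - 0 + rl - 1) rl = 1 :=
        (PySem.Int.floordiv_eq_iff_of_pos hrl).mpr ⟨hb1, hb2⟩
      rw [← PySem.Int.floordiv_eq_ediv_of_pos hrl, this]
      decide
  rw [hcnt, List.range_succ_eq_map]
  simp only [List.map_cons, List.map_map]
  congr 1
  · simp
  · apply List.map_congr_left
    intro k _
    simp only [Function.comp, Nat.succ_eq_add_one]
    push_cast
    ring

theorem pvRange_single (rl n : Int) (hrl : 0 < rl) (h0 : 0 < n) (hle : n ≤ rl) :
    PySem.List.pyRange 0 n rl = [0] := by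
  rw [pvRange_peel rl n hrl h0]
  rw [PySem.List.pyRange_of_pos _ _ hrl, if_neg (by omega : ¬ (0 : Int) < n - rl)]
  simp

-- B's chunker peels one full row off the front
theorem pvRowsB_peel (rl : Int) (hrl : 0 < rl) (data : List Int)
    (h : rl ≤ (data.length : Int)) :
    pvRowsB data rl = data.take rl.toNat :: pvRowsB (data.drop rl.toNat) rl := by
  unfold pvRowsB
  have hlen : ((data.drop rl.toNat).length : Int) = (data.length : Int) - rl := by
    simp [List.length_drop]; omega
  rw [hlen, pvRange_peel rl _ hrl (by omega)]
  simp only [List.map_cons, List.map_map]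
  congr 1
  · rw [PySem.List.slice_toNat data (by omega) (by omega)]
    simp
  · apply List.map_congr_left
    intro i hi
    have hi0 : 0 ≤ i := by
      have := (PySem.List.mem_pyRange_iff_of_pos hrl i).mp hi
      omega
    simp only [Function.comp]
    rw [PySem.List.slice_toNat data (by omega) (by omega),
        PySem.List.slice_toNat (data.drop rl.toNat) (by omega) (by omega)]
    rw [List.drop_drop]
    congr 1
    · omega
    · congr 1; omega

-- main invariant: A's body + tail padding = B's joined row strings
theorem pvMain (rl : Int) (hrl : 0 < rl) :
    ∀ (n : Nat) (data : List Int), data.length = n →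
      pvBody rl data ++ pvPad rl (data.length : Int)
        = ((pvRowsB data rl).map (pvRowHtml rl)).flatten := by
  intro n
  induction n using Nat.strong_induction_on with
  | _ n ih =>
    intro data hlen
    by_cases hnil : data = []
    · subst hnil
      have : PySem.List.pyRange 0 (0 : Int) rl = [] := by
        rw [PySem.List.pyRange_of_pos _ _ hrl]; simp
      simp [pvBody, pvPad, pvRowsB, this, PySem.Int.mod_eq_emod_of_pos hrl]
    · by_cases hle : (data.length : Int) ≤ rl
      · -- a single (possibly short) row
        have h0 : (0 : Int) < data.length := by
          have := List.length_pos_iff.mpr hnil; omega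
        have hrows : pvRowsB data rl = [data] := by
          unfold pvRowsB
          rw [pvRange_single rl _ hrl h0 hle]
          simp only [List.map_cons, List.map_nil]
          rw [PySem.List.slice_toNat data (le_refl 0) (by omega)]
          simp only [zero_add, Int.toNat_zero, List.drop_zero, Nat.sub_zero]
          rw [List.take_of_length_le (by omega)]
        rw [hrows]
        unfold pvBody
        rw [pvFoldA_chunk rl hrl data hnil hle]
        by_cases heq : (data.length : Int) = rl
        · have hm : PySem.Int.mod rl rl = 0 := by
            rw [PySem.Int.mod_eq_emod_of_pos hrl, Int.emod_self]
          simp [pvPad, pvRowHtml, heq, hm, List.append_assoc]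
        · have hmod : ((data.length : Int)) % rl = (data.length : Int) :=
            Int.emod_eq_of_lt (by omega) (by omega)
          have : PySem.Int.mod (data.length : Int) rl = (data.length : Int) := by
            rw [PySem.Int.mod_eq_emod_of_pos hrl, hmod]
          simp [pvPad, this, pvRowHtml, heq, List.append_assoc, if_neg heq, h0.ne']
          omega
      · -- peel a full row
        rw [not_le] at hle
        have hk : rl.toNat ≤ data.length := by omega
        set c := data.take rl.toNat with hc
        set rest := data.drop rl.toNat with hrest
        have hsplit : data = c ++ rest := (List.take_append_drop _ _).symm
        have hclen : (c.length : Int) = rl := by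
          rw [hc, List.length_take]; omega
        have hrestlen : (rest.length : Int) = (data.length : Int) - rl := by
          rw [hrest, List.length_drop]; omega
        -- body splits
        have hbody : pvBody rl data = pvBody rl c ++ pvBody rl rest := by
          unfold pvBody
          conv_lhs => rw [hsplit]
          rw [List.foldl_append, pvFoldA_factor rl c, pvFoldA_factor rl rest]
          simp only [List.nil_append, List.append_nil]
          rw [pvFoldA_factor]
          simp only []
          congr 1
          apply pvFoldA_congr rl hrl
          rw [Int.zero_emod]
          have : (0 : Int) + (c.length : Int) = rl := by omega
          rw [this, Int.emod_self]
        have hpad : pvPad rl (data.length : Int) = pvPad rl (rest.length : Int) := by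
          unfold pvPad
          have : (data.length : Int) % rl = (rest.length : Int) % rl := by
            have e : (data.length : Int) = (rest.length : Int) + rl * 1 := by omega
            rw [e, Int.add_mul_emod_self_left]
          rw [PySem.Int.mod_eq_emod_of_pos hrl, PySem.Int.mod_eq_emod_of_pos hrl, this]
        have hrowc : pvRowHtml rl c = "<tr>".toList ++ (c.map pvTd).flatten ++ "</tr>".toList := by
          unfold pvRowHtml
          have : (rl - (c.length : Int)).toNat = 0 := by omega
          simp [this]
        have hbodyc : pvBody rl c
            = "<tr>".toList ++ (c.map pvTd).flatten ++ "</tr>".toList := by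
          unfold pvBody
          rw [pvFoldA_chunk rl hrl c (by intro h; rw [h] at hclen; simp at hclen; omega)
            (by omega), if_pos hclen]
        have hrest_lt : rest.length < n := by
          rw [← hlen]; rw [hrest, List.length_drop]; omega
        have ihrest := ih rest.length hrest_lt rest rfl
        rw [hbody, hpad, pvRowsB_peel rl hrl data (by omega)]
        simp only [List.map_cons, List.flatten_cons, ← hc, ← hrest]
        rw [← ihrest, hbodyc, hrowc]
        simp [List.append_assoc]

-- decompose port A into body ++ pad
theorem pvA_decomp (data : List Int) (rl : Int) (hrl : 0 < rl) :
    get_table_sudoku data rl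
      = String.ofList ("<table>".toList ++ (pvBody rl data ++ pvPad rl (data.length : Int))
          ++ "</table>".toList) := by
  unfold get_table_sudoku
  rw [pvFoldA_factor]
  dsimp only
  unfold pvPad pvBody
  rw [zero_add]
  by_cases h : PySem.Int.mod (data.length : Int) rl = 0
  · simp [h]
  · rw [if_pos h, if_pos h, pvPadFold, PySem.List.length_pyRange_one]
    simp [List.append_assoc]

-- ===== VERDICT (by name: the statement is the Claim_ definition above) =====
theorem get_table_sudoku_spec : Claim_equal_get_table_sudoku := by
  intro data rl _ hpre
  unfold Spec_get_table_sudoku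
  have hrl : 0 < rl := hpre
  rw [pvA_decomp data rl hrl]
  unfold get_table_sudoku_alt
  rw [pvMain rl hrl data.length data rfl]
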